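-- pv_equiv track=rewrite | github.com/lv-g-eng/ai--reviewer | backend/app/services/ai_pr_reviewer.py | _parse_text_analysis
-- ===== SOURCE A (Python) =====
-- from typing import Dict, List, Optional, Any
--
-- def _parse_text_analysis(analysis_text: str) -> Dict:
--     """Parse analysis text when JSON parsing fails."""
--     result = {
--         "architectural_issues": [],
--         "security_issues": [],
--         "code_quality_issues": [],
--         "suggestions": []
--     }
--
--     if not analysis_text:
--         return result
--
--     lines = analysis_text.split('\n')
--     current_section = None
--
--     section_keywords = {
--         "architectural": "architectural_issues",
--         "architecture": "architectural_issues",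
--         "security": "security_issues",
--         "quality": "code_quality_issues",
--         "suggestion": "suggestions",
--         "recommendation": "suggestions"
--     }
--
--     for line in lines:
--         line = line.strip()
--         if not line:
--             continue
--
--         # Check for section headers (must not start with bullet points)
--         lower_line = line.lower()
--         found_section = False
--         if not line.startswith(("- ", "* ")):
--             for keyword, section in section_keywords.items():
--                 if keyword in lower_line and ("issue" in lower_line or "suggest" in lower_line or "recommend" in lower_line or ":" in lower_line):
--                     current_section = section
--                     found_section = True
--                     break
--
--         if found_section:
--             continue
--
--         # Check for bullet points
--         if (line.startswith("- ") or line.startswith("* ")) and current_section: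
--             result[current_section].append(line[2:])
--         elif current_section:
--             # Fallback for lines that don't start with bullet points but are under a section
--             result[current_section].append(line)
--
--     return result
-- ===== SOURCE B (Python) =====
-- SECTION_KEYWORDS = [
--     ("architectural", "architectural_issues"),
--     ("architecture", "architectural_issues"),
--     ("security", "security_issues"),
--     ("quality", "code_quality_issues"),
--     ("suggestion", "suggestions"),
--     ("recommendation", "suggestions"),
-- ]
--
-- RESULT_KEYS = ["architectural_issues", "security_issues",
--                "code_quality_issues", "suggestions"]
--
--
-- def _header_section(line):
--     """Section named by a header line, else None (bullets are never headers)."""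
--     if line.startswith(("- ", "* ")):
--         return None
--     low = line.lower()
--     if ("issue" not in low and "suggest" not in low
--             and "recommend" not in low and ":" not in low):
--         return None
--     for kw, sec in SECTION_KEYWORDS:
--         if kw in low:
--             return sec
--     return None
--
--
-- def _split_segments(lines):
--     """Index-then-fill: list of (section, content lines) segments, one per header."""
--     segs = []
--     n = len(lines)
--     i = 0
--     while i < n:
--         sec = _header_section(lines[i])
--         i += 1
--         if sec is None:
--             continue
--         body = []
--         while i < n and _header_section(lines[i]) is None:
--             l = lines[i]
--             i += 1
--             if l:
--                 body.append(l[2:] if l.startswith(("- ", "* ")) else l)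
--         segs.append((sec, body))
--     return segs
--
--
-- def _parse_text_analysis(analysis_text):
--     lines = [ln.strip() for ln in analysis_text.split('\n')]
--     segs = _split_segments(lines)
--     return {k: [x for sec, body in segs if sec == k for x in body]
--             for k in RESULT_KEYS}
-- ===== Notes on version B (the rewrite author's own statement) =====
-- stated objective: alternative
-- what changed: Replaces A's single stateful accumulation loop (current_section state mutating four buckets) with an index-then-fill decomposition: one pass partitions the stripped lines into header-owned segments, then each result bucket is built by concatenating its segments' bodies.
import Mathlib
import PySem

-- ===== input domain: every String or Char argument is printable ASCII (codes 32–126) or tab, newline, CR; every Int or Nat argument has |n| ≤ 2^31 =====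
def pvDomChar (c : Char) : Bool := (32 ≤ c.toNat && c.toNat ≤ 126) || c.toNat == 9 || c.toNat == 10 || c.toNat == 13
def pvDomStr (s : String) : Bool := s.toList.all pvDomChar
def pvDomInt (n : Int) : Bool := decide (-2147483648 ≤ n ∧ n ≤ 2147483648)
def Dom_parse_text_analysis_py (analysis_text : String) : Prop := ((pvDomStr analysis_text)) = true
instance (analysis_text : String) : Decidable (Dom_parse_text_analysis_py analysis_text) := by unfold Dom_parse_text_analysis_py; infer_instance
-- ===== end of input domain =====

-- B replaces A's single stateful line loop by an index-then-fill decomposition (split the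
-- stripped lines into header-owned segments, then build each bucket from its segments);
-- objective: alternative structure, same cost.

-- ===== PORT A =====

-- section_keywords dict, iterated in insertion order
def pvKwItemsA : List (String × String) :=
  [("architectural", "architectural_issues"), ("architecture", "architectural_issues"),
   ("security", "security_issues"), ("quality", "code_quality_issues"),
   ("suggestion", "suggestions"), ("recommendation", "suggestions")]

-- A's header test on the stripped line: the keyword loop with its first-match break
def pvHeaderA (l : String) : Option String :=
  let low := PySem.Str.lower l
  (if !(PySem.Str.startswith l "- " || PySem.Str.startswith l "* ") then
     pvKwItemsA.find? (fun p => PySem.Str.isIn p.1 low &&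
       (PySem.Str.isIn "issue" low || PySem.Str.isIn "suggest" low ||
        PySem.Str.isIn "recommend" low || PySem.Str.isIn ":" low))
   else none).map (·.2)

-- the for-loop over lines with its (current_section, result) state
def pvGoA : List String → Option String → PySem.Dict String (List String) → PySem.Dict String (List String)
  | [], _, d => d
  | line :: ls, cur, d =>
    let l := PySem.Str.strip line
    if l = "" then pvGoA ls cur d
    else
      match pvHeaderA l with
      | some sec => pvGoA ls (some sec) d
      | none =>
        match cur with
        | some c =>
          if PySem.Str.startswith l "- " || PySem.Str.startswith l "* " then
            pvGoA ls cur (d.modify c [] (· ++ [PySem.Str.slice l (some 2) none]))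
          else
            pvGoA ls cur (d.modify c [] (· ++ [l]))
        | none => pvGoA ls cur d

def parse_text_analysis_py (analysis_text : String) : List (String × List String) :=
  let result : PySem.Dict String (List String) :=
    PySem.Dict.ofList [("architectural_issues", []), ("security_issues", []),
                       ("code_quality_issues", []), ("suggestions", [])]
  if analysis_text = "" then result.items
  else
    -- split? is `some` because the separator "\n" is non-empty
    (pvGoA ((PySem.Str.split? analysis_text "\n").getD []) none result).items

-- ===== PORT B =====

def pvKwB : List (String × String) :=
  [("architectural", "architectural_issues"), ("architecture", "architectural_issues"),
   ("security", "security_issues"), ("quality", "code_quality_issues"),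
   ("suggestion", "suggestions"), ("recommendation", "suggestions")]

def pvHeaderB (line : String) : Option String :=
  if PySem.Str.startswith line "- " || PySem.Str.startswith line "* " then none
  else
    let low := PySem.Str.lower line
    if !PySem.Str.isIn "issue" low && !PySem.Str.isIn "suggest" low &&
       !PySem.Str.isIn "recommend" low && !PySem.Str.isIn ":" low then none
    else (pvKwB.find? (fun p => PySem.Str.isIn p.1 low)).map (·.2)

-- inner while loop: content lines of one segment, and the remaining suffix
def pvTakeBody : List String → List String × List String
  | [] => ([], [])
  | l :: ls =>
    if (pvHeaderB l).isSome then ([], l :: ls)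
    else
      let r := pvTakeBody ls
      if l = "" then r
      else ((if PySem.Str.startswith l "- " || PySem.Str.startswith l "* " then
               PySem.Str.slice l (some 2) none else l) :: r.1, r.2)

theorem pvTakeBody_len : ∀ ls : List String, (pvTakeBody ls).2.length ≤ ls.length := by
  intro ls
  induction ls with
  | nil => simp [pvTakeBody]
  | cons l ls ih =>
    simp only [pvTakeBody]
    split
    · simp
    · split <;> simp <;> omega

-- outer while loop: one (section, body) segment per header line
def pvSplitSegs : List String → List (String × List String)
  | [] => []
  | l :: ls =>
    match pvHeaderB l with
    | none => pvSplitSegs ls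
    | some sec => (sec, (pvTakeBody ls).1) :: pvSplitSegs (pvTakeBody ls).2
termination_by ls => ls.length
decreasing_by
  · simp
  · have := pvTakeBody_len ls; simp; omega

-- the per-key comprehension over the segments
def pvCollect (k : String) (segs : List (String × List String)) : List String :=
  (segs.filter (fun p => p.1 == k)).flatMap (fun p => p.2)

def parse_text_analysis_py_alt (analysis_text : String) : List (String × List String) :=
  let lines := ((PySem.Str.split? analysis_text "\n").getD []).map PySem.Str.strip
  let segs := pvSplitSegs lines
  ["architectural_issues", "security_issues", "code_quality_issues", "suggestions"].map
    (fun k => (k, pvCollect k segs))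

-- ===== PRECONDITION & SPEC =====
def Spec_parse_text_analysis_py (analysis_text : String) (out : List (String × List String)) : Prop := out = parse_text_analysis_py_alt analysis_text
instance (analysis_text : String) (out : List (String × List String)) : Decidable (Spec_parse_text_analysis_py analysis_text out) := by unfold Spec_parse_text_analysis_py; infer_instance

-- ===== CLAIM (what is proved, stated in full; the proofs are below) =====
def Claim_equal_parse_text_analysis_py : Prop := ∀ (analysis_text : String), Dom_parse_text_analysis_py analysis_text → Spec_parse_text_analysis_py analysis_text (parse_text_analysis_py analysis_text)

-- ===== LEMMAS AND PROOFS =====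

theorem pvHeader_eq (l : String) : pvHeaderA l = pvHeaderB l := by
  unfold pvHeaderA pvHeaderB
  dsimp only
  cases hb : (PySem.Str.startswith l "- " || PySem.Str.startswith l "* ")
  · simp only [Bool.not_false, if_true]
    cases h1 : PySem.Str.isIn "issue" (PySem.Str.lower l) <;>
    cases h2 : PySem.Str.isIn "suggest" (PySem.Str.lower l) <;>
    cases h3 : PySem.Str.isIn "recommend" (PySem.Str.lower l) <;>
    cases h4 : PySem.Str.isIn ":" (PySem.Str.lower l) <;>
      simp only [Bool.or_true, Bool.or_false, Bool.and_true, Bool.and_false,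
        Bool.not_false, if_true] <;> rfl
  · simp only [Bool.not_true, if_false, ite_true, Bool.false_eq_true]
    rfl

theorem pvHeaderB_empty : pvHeaderB "" = none := by decide

theorem pvSplitSegs_nil : pvSplitSegs [] = [] := by rw [pvSplitSegs]

theorem pvSplitSegs_cons_none {l : String} (ls : List String) (h : pvHeaderB l = none) :
    pvSplitSegs (l :: ls) = pvSplitSegs ls := by rw [pvSplitSegs, h]

theorem pvSplitSegs_cons_some {l s : String} (ls : List String) (h : pvHeaderB l = some s) :
    pvSplitSegs (l :: ls) = (s, (pvTakeBody ls).1) :: pvSplitSegs (pvTakeBody ls).2 := by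
  rw [pvSplitSegs, h]

theorem pvTakeBody_nil : pvTakeBody [] = ([], []) := rfl

theorem pvTakeBody_header {l : String} (ls : List String) (h : (pvHeaderB l).isSome) :
    pvTakeBody (l :: ls) = ([], l :: ls) := by simp [pvTakeBody, h]

theorem pvTakeBody_blank (ls : List String) : pvTakeBody ("" :: ls) = pvTakeBody ls := by
  simp [pvTakeBody, pvHeaderB_empty]

theorem pvTakeBody_content {l : String} (ls : List String) (h : pvHeaderB l = none)
    (hne : l ≠ "") :
    pvTakeBody (l :: ls) =
      ((if PySem.Str.startswith l "- " || PySem.Str.startswith l "* " then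
          PySem.Str.slice l (some 2) none else l) :: (pvTakeBody ls).1, (pvTakeBody ls).2) := by
  simp [pvTakeBody, h, hne]

theorem pvCollect_nil (k : String) : pvCollect k [] = [] := rfl

theorem pvCollect_cons (k s : String) (b : List String) (segs : List (String × List String)) :
    pvCollect k ((s, b) :: segs) = (if s = k then b else []) ++ pvCollect k segs := by
  simp only [pvCollect, List.filter_cons]
  by_cases h : s = k <;> simp [h]

-- the B-side value matching A's loop state (cur, ·) on the stripped suffix
def pvRest (cur : Option String) (k : String) (ss : List String) : List String :=
  match cur with
  | none => pvCollect k (pvSplitSegs ss)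
  | some c => (if c = k then (pvTakeBody ss).1 else []) ++ pvCollect k (pvSplitSegs (pvTakeBody ss).2)

theorem pvRest_none (k : String) (ss : List String) :
    pvRest none k ss = pvCollect k (pvSplitSegs ss) := rfl

theorem pvRest_some (c k : String) (ss : List String) :
    pvRest (some c) k ss =
      (if c = k then (pvTakeBody ss).1 else []) ++
        pvCollect k (pvSplitSegs (pvTakeBody ss).2) := rfl

theorem pvGo_getD : ∀ (ls : List String) (cur : Option String)
    (d : PySem.Dict String (List String)) (k : String),
    (pvGoA ls cur d).getD k [] = d.getD k [] ++ pvRest cur k (ls.map PySem.Str.strip) := by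
  intro ls
  induction ls with
  | nil =>
    intro cur d k
    cases cur <;>
      simp [pvGoA, pvRest, pvSplitSegs_nil, pvTakeBody_nil, pvCollect_nil]
  | cons line ls ih =>
    intro cur d k
    simp only [pvGoA, List.map_cons]
    by_cases hl : PySem.Str.strip line = ""
    · rw [if_pos hl, ih, hl]
      congr 1
      cases cur with
      | none => rw [pvRest_none, pvRest_none, pvSplitSegs_cons_none _ pvHeaderB_empty]
      | some c => rw [pvRest_some, pvRest_some, pvTakeBody_blank]
    · rw [if_neg hl]
      cases hh : pvHeaderA (PySem.Str.strip line) with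
      | some sec =>
        have hB : pvHeaderB (PySem.Str.strip line) = some sec := by rw [← pvHeader_eq, hh]
        dsimp only
        rw [ih]
        refine congrArg (d.getD k [] ++ ·) ?_
        cases cur with
        | none =>
          rw [pvRest_none, pvSplitSegs_cons_some _ hB, pvCollect_cons, pvRest_some]
        | some c =>
          rw [pvRest_some, pvRest_some, pvTakeBody_header _ (by simp [hB]),
            pvSplitSegs_cons_some _ hB, pvCollect_cons]
          simp
      | none =>
        have hB : pvHeaderB (PySem.Str.strip line) = none := by rw [← pvHeader_eq, hh]
        cases cur with
        | none =>
          dsimp only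
          rw [ih]
          refine congrArg (d.getD k [] ++ ·) ?_
          rw [pvRest_none, pvRest_none, pvSplitSegs_cons_none _ hB]
        | some c =>
          dsimp only
          have hbody : ∀ x, (pvGoA ls (some c) (d.modify c [] (· ++ [x]))).getD k [] =
              d.getD k [] ++ ((if c = k then x :: (pvTakeBody (ls.map PySem.Str.strip)).1 else []) ++
                pvCollect k (pvSplitSegs (pvTakeBody (ls.map PySem.Str.strip)).2)) := by
            intro x
            rw [ih, pvRest_some, PySem.Dict.getD_modify]
            by_cases hck : c = k
            · subst hck; simp
            · have hkc : ¬ k = c := fun h => hck h.symm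
              simp [hkc, hck]
          have hrest : pvRest (some c) k (PySem.Str.strip line :: ls.map PySem.Str.strip) =
              (if c = k then
                 (if PySem.Str.startswith (PySem.Str.strip line) "- " ||
                     PySem.Str.startswith (PySem.Str.strip line) "* " then
                    PySem.Str.slice (PySem.Str.strip line) (some 2) none
                  else PySem.Str.strip line) :: (pvTakeBody (ls.map PySem.Str.strip)).1
               else []) ++ pvCollect k (pvSplitSegs (pvTakeBody (ls.map PySem.Str.strip)).2) := by
            rw [pvRest_some, pvTakeBody_content _ hB hl]
          rw [hrest]
          by_cases hbul : (PySem.Str.startswith (PySem.Str.strip line) "- " ||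
              PySem.Str.startswith (PySem.Str.strip line) "* ") = true
          · rw [if_pos hbul, hbody, if_pos hbul]
          · rw [if_neg hbul, hbody, if_neg hbul]

def pvSections : List String :=
  ["architectural_issues", "security_issues", "code_quality_issues", "suggestions"]

theorem pvHeaderA_mem {l s : String} (h : pvHeaderA l = some s) : s ∈ pvSections := by
  unfold pvHeaderA at h
  split at h
  · rcases Option.map_eq_some_iff.mp h with ⟨p, hp, hps⟩
    have hm := List.mem_of_find?_eq_some hp
    subst hps
    simp only [pvKwItemsA, List.mem_cons, List.not_mem_nil, or_false] at hm
    rcases hm with h | h | h | h | h | h <;> subst h <;> decide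
  · simp at h

theorem pvContains_modify_iff (d : PySem.Dict String (List String)) (c c' : String)
    (f : List String → List String) :
    (d.modify c [] f).contains c' = true ↔ d.contains c' = true ∨ c' = c := by
  rw [PySem.Dict.contains_modify]
  simp only [Bool.or_eq_true, beq_iff_eq]
  tauto

theorem pvGo_keys : ∀ (ls : List String) (cur : Option String)
    (d : PySem.Dict String (List String)),
    (∀ c, cur = some c → d.contains c = true) →
    (∀ s ∈ pvSections, d.contains s = true) →
    (pvGoA ls cur d).keys = d.keys := by
  intro ls
  induction ls with
  | nil => intro cur d _ _; rfl
  | cons line ls ih =>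
    intro cur d hcur hsec
    simp only [pvGoA]
    by_cases hl : PySem.Str.strip line = ""
    · rw [if_pos hl]; exact ih cur d hcur hsec
    · rw [if_neg hl]
      cases hh : pvHeaderA (PySem.Str.strip line) with
      | some sec =>
        exact ih (some sec) d (fun c hc => by cases hc; exact hsec _ (pvHeaderA_mem hh)) hsec
      | none =>
        cases cur with
        | none => exact ih none d (by simp) hsec
        | some c =>
          dsimp only
          have hc : d.contains c = true := hcur c rfl
          have hstep : ∀ f, (pvGoA ls (some c) (d.modify c [] f)).keys = d.keys := by
            intro f
            rw [ih (some c) _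
              (fun c' hc' => by cases hc'; exact (pvContains_modify_iff d c c f).mpr (Or.inr rfl))
              (fun s hs => (pvContains_modify_iff d c s f).mpr (Or.inl (hsec s hs)))]
            rw [PySem.Dict.keys_modify, PySem.Dict.keys_insert_of_contains _ _ hc]
          split <;> exact hstep _

-- ===== VERDICT (by name: the statement is the Claim_ definition above) =====
theorem parse_text_analysis_py_spec : Claim_equal_parse_text_analysis_py := by
  unfold Claim_equal_parse_text_analysis_py Spec_parse_text_analysis_py
  intro t _
  by_cases ht : t = ""
  · subst ht
    have hln : (((PySem.Str.split? "" "\n").getD []).map PySem.Str.strip) = [""] := by decide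
    have hsegs : pvSplitSegs ((((PySem.Str.split? "" "\n").getD []).map PySem.Str.strip)) = [] := by
      rw [hln, pvSplitSegs_cons_none _ pvHeaderB_empty, pvSplitSegs_nil]
    unfold parse_text_analysis_py parse_text_analysis_py_alt
    rw [if_pos rfl]
    dsimp only
    rw [hsegs]
    decide
  · unfold parse_text_analysis_py
    rw [if_neg ht]
    set init : PySem.Dict String (List String) :=
      PySem.Dict.ofList [("architectural_issues", []), ("security_issues", []),
                         ("code_quality_issues", []), ("suggestions", [])] with hinit
    set lines := (PySem.Str.split? t "\n").getD [] with hlines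
    have hkeys : (pvGoA lines none init).keys = init.keys :=
      pvGo_keys lines none init (by simp) (by rw [hinit]; decide)
    have hnodup : (pvGoA lines none init).keys.Nodup := by rw [hkeys, hinit]; decide
    have hik : init.keys = pvSections := by rw [hinit]; decide
    rw [PySem.Dict.items_eq_map_keys _ hnodup [], hkeys, hik]
    have h0 : ∀ k ∈ pvSections, init.getD k [] = [] := by rw [hinit]; decide
    have comp : ∀ k ∈ pvSections, (pvGoA lines none init).getD k [] =
        pvCollect k (pvSplitSegs (lines.map PySem.Str.strip)) := by
      intro k hk
      rw [pvGo_getD, pvRest_none, h0 k hk, List.nil_append]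
    have c1 := comp "architectural_issues" (by decide)
    have c2 := comp "security_issues" (by decide)
    have c3 := comp "code_quality_issues" (by decide)
    have c4 := comp "suggestions" (by decide)
    unfold parse_text_analysis_py_alt
    rw [← hlines]
    simp only [pvSections, List.map_cons, List.map_nil, c1, c2, c3, c4]
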